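-- pv_equiv track=rewrite | github.com/pypi-data/pypi-mirror-361 | packages/hex-address/hex_address-1.0.0.tar.gz/hex_address-1.0.0/src/h3_syllable/h3_syllable_system.py | _format_syllable_address
-- ===== SOURCE A (Python) =====
-- from typing import Tuple, List, Dict, Optional
--
-- def _format_syllable_address(syllables: List[str]) -> str:
--     """Format syllable address based on address length."""
--     length = len(syllables)
--
--     if length == 6:
--         # xx-xx-xx|xx-xx-xx
--         return f"{'-'.join(syllables[:3])}|{'-'.join(syllables[3:])}"
--     elif length == 7:
--         # xx-xx-xx-xx|xx-xx-xx
--         return f"{'-'.join(syllables[:4])}|{'-'.join(syllables[4:])}"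
--     elif length == 8:
--         # xx-xx-xx-xx|xx-xx-xx-xx
--         return f"{'-'.join(syllables[:4])}|{'-'.join(syllables[4:])}"
--     elif length == 9:
--         # xx-xx-xx|xx-xx-xx|xx-xx-xx
--         return f"{'-'.join(syllables[:3])}|{'-'.join(syllables[3:6])}|{'-'.join(syllables[6:])}"
--     elif length == 10:
--         # xx-xx-xx|xx-xx-xx|xx-xx-xx-xx
--         return f"{'-'.join(syllables[:3])}|{'-'.join(syllables[3:6])}|{'-'.join(syllables[6:])}"
--     elif length == 12:
--         # xx-xx-xx|xx-xx-xx|xx-xx-xx|xx-xx-xx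
--         return f"{'-'.join(syllables[:3])}|{'-'.join(syllables[3:6])}|{'-'.join(syllables[6:9])}|{'-'.join(syllables[9:])}"
--     else:
--         # Default: split into groups of 3, with remainder in last group
--         groups = []
--         for i in range(0, length, 3):
--             groups.append('-'.join(syllables[i:i+3]))
--         return '|'.join(groups)
-- ===== SOURCE B (Python) =====
-- from typing import List
--
--
-- def _format_syllable_address(syllables: List[str]) -> str:
--     """Format syllable address based on address length."""
--     length = len(syllables)
--
--     def sep(b: int) -> str:
--         # Separator written just before element number b (b >= 1): a pipe at
--         # group boundaries, a dash inside a group.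
--         if length == 7 or length == 8:
--             return '|' if b == 4 else '-'
--         if length == 10:
--             return '|' if b == 3 or b == 6 else '-'
--         return '|' if b % 3 == 0 else '-'
--
--     out = ''
--     for i, syllable in enumerate(syllables):
--         if i:
--             out += sep(i)
--         out += syllable
--     return out
-- ===== Notes on version B (the rewrite author's own statement) =====
-- stated objective: alternative
-- what changed: Instead of slicing the list into groups and joining them, B makes a single pass over the syllables, writing before each element a separator chosen by a per-length boundary predicate ('|' at a group boundary: position 4 for lengths 7/8, positions 3 and 6 for length 10, multiples of 3 otherwise; '-' elsewhere).
import Mathlib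
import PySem

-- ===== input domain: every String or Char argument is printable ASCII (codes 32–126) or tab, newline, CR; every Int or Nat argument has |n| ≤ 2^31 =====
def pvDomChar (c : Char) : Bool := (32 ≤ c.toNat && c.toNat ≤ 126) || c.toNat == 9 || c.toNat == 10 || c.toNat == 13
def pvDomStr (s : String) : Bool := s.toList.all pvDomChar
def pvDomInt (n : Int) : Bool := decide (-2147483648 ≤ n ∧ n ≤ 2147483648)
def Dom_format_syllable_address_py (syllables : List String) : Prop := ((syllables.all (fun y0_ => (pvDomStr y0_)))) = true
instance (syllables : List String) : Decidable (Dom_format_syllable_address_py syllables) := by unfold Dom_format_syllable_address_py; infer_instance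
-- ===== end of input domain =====

-- B replaces A's chunk-and-join branches by a single pass that writes each syllable and,
-- before it, a separator ('|' at a group boundary, '-' inside a group) chosen by a
-- per-length boundary predicate (objective: alternative decomposition).


-- ===== PORT A =====
def format_syllable_address_py (syllables : List String) : String :=
  let length : Int := (syllables.length : Int)
  if length = 6 then
    PySem.Str.join "-" (PySem.List.slice syllables none (some 3)) ++ "|" ++
      PySem.Str.join "-" (PySem.List.slice syllables (some 3) none)
  else if length = 7 then
    PySem.Str.join "-" (PySem.List.slice syllables none (some 4)) ++ "|" ++
      PySem.Str.join "-" (PySem.List.slice syllables (some 4) none)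
  else if length = 8 then
    PySem.Str.join "-" (PySem.List.slice syllables none (some 4)) ++ "|" ++
      PySem.Str.join "-" (PySem.List.slice syllables (some 4) none)
  else if length = 9 then
    PySem.Str.join "-" (PySem.List.slice syllables none (some 3)) ++ "|" ++
      PySem.Str.join "-" (PySem.List.slice syllables (some 3) (some 6)) ++ "|" ++
      PySem.Str.join "-" (PySem.List.slice syllables (some 6) none)
  else if length = 10 then
    PySem.Str.join "-" (PySem.List.slice syllables none (some 3)) ++ "|" ++
      PySem.Str.join "-" (PySem.List.slice syllables (some 3) (some 6)) ++ "|" ++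
      PySem.Str.join "-" (PySem.List.slice syllables (some 6) none)
  else if length = 12 then
    PySem.Str.join "-" (PySem.List.slice syllables none (some 3)) ++ "|" ++
      PySem.Str.join "-" (PySem.List.slice syllables (some 3) (some 6)) ++ "|" ++
      PySem.Str.join "-" (PySem.List.slice syllables (some 6) (some 9)) ++ "|" ++
      PySem.Str.join "-" (PySem.List.slice syllables (some 9) none)
  else
    PySem.Str.join "|"
      ((PySem.List.pyRange 0 length 3).foldl
        (fun groups i =>
          groups ++ [PySem.Str.join "-" (PySem.List.slice syllables (some i) (some (i + 3)))]) [])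

-- ===== PORT B =====
-- the closure `sep(b)`: the separator written just before element number b (b >= 1)
def pvSep (length b : Int) : String :=
  if length = 7 ∨ length = 8 then (if b = 4 then "|" else "-")
  else if length = 10 then (if b = 3 ∨ b = 6 then "|" else "-")
  else if PySem.Int.mod b 3 = 0 then "|" else "-"

def format_syllable_address_py_alt (syllables : List String) : String :=
  let length : Int := (syllables.length : Int)
  (PySem.List.enumerate syllables 0).foldl
    (fun out p => (if p.1 ≠ 0 then out ++ pvSep length p.1 else out) ++ p.2) ""

-- ===== PRECONDITION & SPEC =====
def Spec_format_syllable_address_py (syllables : List String) (out : String) : Prop := out = format_syllable_address_py_alt syllables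
instance (syllables : List String) (out : String) : Decidable (Spec_format_syllable_address_py syllables out) := by unfold Spec_format_syllable_address_py; infer_instance

-- ===== CLAIM (what is proved, stated in full; the proofs are below) =====
def Claim_equal_format_syllable_address_py : Prop := ∀ (syllables : List String), Dom_format_syllable_address_py syllables → Spec_format_syllable_address_py syllables (format_syllable_address_py syllables)

-- ===== LEMMAS AND PROOFS =====

-- B's loop as a structural recursion: the string emitted from element number i on
def pvAll (sep : Int → String) : List String → Int → String
  | [], _ => ""
  | s :: rest, i => (if i ≠ 0 then sep i else "") ++ (s ++ pvAll sep rest (i + 1))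

lemma foldl_enum_eq_pvAll (n : Int) : ∀ (xs : List String) (i : Int) (acc : String),
    (PySem.List.enumerate xs i).foldl
      (fun out p => (if p.1 ≠ 0 then out ++ pvSep n p.1 else out) ++ p.2) acc
      = acc ++ pvAll (pvSep n) xs i := by
  intro xs
  induction xs with
  | nil => intro i acc; simp [PySem.List.enumerate_nil, pvAll]
  | cons x t ih =>
    intro i acc
    rw [PySem.List.enumerate_cons, List.foldl_cons, ih]
    simp only [pvAll]
    split_ifs <;> simp [String.append_assoc]

lemma alt_eq_pvAll (xs : List String) :
    format_syllable_address_py_alt xs = pvAll (pvSep (xs.length : Int)) xs 0 := by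
  unfold format_syllable_address_py_alt
  rw [foldl_enum_eq_pvAll]
  simp

-- outside the exceptional lengths 7, 8, 10 the separator rule is the plain mod-3 rule
lemma pvSep_default (n : Int) (h7 : n ≠ 7) (h8 : n ≠ 8) (h10 : n ≠ 10) :
    pvSep n = pvSep 0 := by
  funext b
  unfold pvSep
  rw [if_neg (show ¬(n = 7 ∨ n = 8) from by omega), if_neg h10,
    if_neg (show ¬((0:Int) = 7 ∨ (0:Int) = 8) from by norm_num),
    if_neg (show ¬(0:Int) = 10 from by norm_num)]

lemma pvSep0_mod (i : Int) : pvSep 0 (i + 3) = pvSep 0 i := by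
  unfold pvSep
  rw [if_neg (show ¬((0:Int) = 7 ∨ (0:Int) = 8) from by norm_num),
    if_neg (show ¬(0:Int) = 10 from by norm_num),
    PySem.Int.mod_eq_emod_of_pos (show (0:Int) < 3 from by norm_num),
    PySem.Int.mod_eq_emod_of_pos (show (0:Int) < 3 from by norm_num),
    show (i + 3) % 3 = i % 3 from by omega]
  norm_num

lemma pvAll_shift : ∀ (l : List String) (i : Int), 1 ≤ i →
    pvAll (pvSep 0) l (i + 3) = pvAll (pvSep 0) l i := by
  intro l
  induction l with
  | nil => intro i _; rfl
  | cons x t ih =>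
    intro i hi
    simp only [pvAll, if_pos (show i + 3 ≠ 0 from by omega), if_pos (show i ≠ 0 from by omega),
      pvSep0_mod]
    rw [show i + 3 + 1 = (i + 1) + 3 from by ring, ih (i + 1) (by omega)]

-- A's default layout, as a function
def pvAdef (xs : List String) : String :=
  PySem.Str.join "|" ((PySem.List.pyRange 0 (xs.length : Int) 3).map
    (fun i => PySem.Str.join "-" (PySem.List.slice xs (some i) (some (i + 3)))))

-- pyRange with positive step 3: cons and nil forms
lemma pyRange_three_cons (a b : Int) (h : a < b) :
    PySem.List.pyRange a b 3 = a :: PySem.List.pyRange (a + 3) b 3 := by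
  rw [PySem.List.pyRange_of_pos a b (by norm_num),
      PySem.List.pyRange_of_pos (a + 3) b (by norm_num)]
  have hc : (if a < b then ((b - a + 3 - 1) / 3).toNat else 0)
      = (if a + 3 < b then ((b - (a + 3) + 3 - 1) / 3).toNat else 0) + 1 := by
    split_ifs <;> omega
  rw [hc, List.range_succ_eq_map]
  simp [List.map_map, Function.comp]
  intro k _
  ring

lemma pyRange_three_shift (a b : Int) :
    PySem.List.pyRange (a + 3) b 3 = (PySem.List.pyRange a (b - 3) 3).map (· + 3) := by
  rw [PySem.List.pyRange_of_pos (a + 3) b (by norm_num),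
      PySem.List.pyRange_of_pos a (b - 3) (by norm_num)]
  have hc : (if a + 3 < b then ((b - (a + 3) + 3 - 1) / 3).toNat else 0)
      = (if a < b - 3 then ((b - 3 - a + 3 - 1) / 3).toNat else 0) := by
    split_ifs <;> omega
  rw [hc, List.map_map]
  exact List.map_congr_left (fun k _ => by simp [Function.comp]; ring)

-- peeling one full group of 3 off the default layout
lemma pvAdef_rec (xs : List String) (h : 3 < xs.length) :
    pvAdef xs = PySem.Str.join "-" (xs.take 3) ++ ("|" ++ pvAdef (xs.drop 3)) := by
  unfold pvAdef
  rw [pyRange_three_cons 0 (xs.length : Int) (by exact_mod_cast by omega)]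
  have hshift := pyRange_three_shift 0 (xs.length : Int)
  norm_num at hshift
  rw [show (0:Int) + 3 = 3 from by norm_num, hshift, List.map_cons, List.map_map]
  have hlen3 : ((xs.length : Int) - 3) = (((xs.drop 3).length : Nat) : Int) := by
    simp; omega
  have hm : ∀ i ∈ PySem.List.pyRange 0 (((xs.drop 3).length : Nat) : Int) 3,
      ((fun i => PySem.Str.join "-" (PySem.List.slice xs (some i) (some (i + 3)))) ∘ (· + 3)) i
        = PySem.Str.join "-" (PySem.List.slice (xs.drop 3) (some i) (some (i + 3))) := by
    intro i hi
    have hi' := (PySem.List.mem_pyRange_iff_of_pos (by norm_num) i).1 hi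
    have h0i : 0 ≤ i := hi'.1
    simp only [Function.comp]
    rw [PySem.List.slice_toNat xs (by omega) (by omega),
      PySem.List.slice_toNat (xs.drop 3) h0i (by omega), List.drop_drop,
      show (i + 3 + 3).toNat - (i + 3).toNat = (i + 3).toNat - i.toNat from by omega,
      show (i + 3).toNat = 3 + i.toNat from by omega]
  rw [hlen3, List.map_congr_left hm]
  -- the tail group list is nonempty, so join "|" splits off the head group
  have hne : PySem.List.pyRange 0 (((xs.drop 3).length : Nat) : Int) 3 ≠ [] := by
    rw [pyRange_three_cons 0 _ (by simp; omega)]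
    exact List.cons_ne_nil _ _
  rcases hg : (PySem.List.pyRange 0 (((xs.drop 3).length : Nat) : Int) 3).map
      (fun i => PySem.Str.join "-" (PySem.List.slice (xs.drop 3) (some i) (some (i + 3))))
    with _ | ⟨g0, gs⟩
  · exact absurd (List.map_eq_nil_iff.mp hg) hne
  · apply String.toList_inj.mp
    rw [show PySem.List.slice xs (some 0) (some (0 + 3)) = xs.take 3 from by
      rw [PySem.List.slice_toNat xs (by norm_num) (by norm_num)]; simp]
    simp [PySem.Str.toList_join, PySem.Chars.join_cons_cons, String.toList_append]

-- the single separator-interleaving pass produces the default chunk-and-join layout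
lemma default_eq : ∀ (n : Nat) (xs : List String), xs.length = n →
    pvAll (pvSep 0) xs 0 = pvAdef xs := by
  intro n
  induction n using Nat.strong_induction_on with
  | _ n ih =>
    intro xs hlen
    subst hlen
    match xs with
    | [] => decide
    | [a] =>
      apply String.toList_inj.mp
      simp [pvAll, pvAdef, show PySem.List.pyRange 0 1 3 = [0] from by decide,
        PySem.List.slice_toNat, PySem.Str.toList_join, PySem.Chars.join_singleton]
    | [a, b] =>
      apply String.toList_inj.mp
      simp [pvAll, pvAdef, show PySem.List.pyRange 0 2 3 = [0] from by decide,
        show pvSep 0 1 = "-" from by decide, PySem.List.slice_toNat, PySem.Str.toList_join,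
        PySem.Chars.join_singleton, PySem.Chars.join_cons_cons, String.toList_append]
    | [a, b, c] =>
      apply String.toList_inj.mp
      simp [pvAll, pvAdef, show PySem.List.pyRange 0 3 3 = [0] from by decide,
        show pvSep 0 1 = "-" from by decide, show pvSep 0 2 = "-" from by decide,
        PySem.List.slice_toNat, PySem.Str.toList_join, PySem.Chars.join_singleton,
        PySem.Chars.join_cons_cons, String.toList_append]
    | a :: b :: c :: r :: t =>
      -- length ≥ 4: peel one group of 3 on both sides
      have hrec := pvAdef_rec (a :: b :: c :: r :: t) (by simp)
      simp only [List.take, List.drop] at hrec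
      have hIH := ih (r :: t).length (by simp) (r :: t) rfl
      have h4 : pvAll (pvSep 0) t 4 = pvAll (pvSep 0) t 1 := by
        have h := pvAll_shift t 1 (le_refl 1)
        norm_num at h
        exact h
      rw [hrec, ← hIH]
      apply String.toList_inj.mp
      simp [pvAll, h4, show pvSep 0 1 = "-" from by decide, show pvSep 0 2 = "-" from by decide,
        show pvSep 0 3 = "|" from by decide, PySem.Str.toList_join, PySem.Chars.join_cons_cons,
        PySem.Chars.join_singleton, String.toList_append]

-- ===== VERDICT (by name: the statement is the Claim_ definition above) =====
theorem format_syllable_address_py_spec : Claim_equal_format_syllable_address_py := by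
  intro xs _
  unfold Spec_format_syllable_address_py
  rw [alt_eq_pvAll]
  unfold format_syllable_address_py
  simp only []
  split_ifs with c6 c7 c8 c9 c10 c12
  · have hlen : xs.length = 6 := by exact_mod_cast c6
    rcases xs with _ | ⟨a, _ | ⟨b, _ | ⟨c, _ | ⟨d, _ | ⟨e, _ | ⟨f, _ | ⟨g, t⟩⟩⟩⟩⟩⟩⟩ <;>
      simp at hlen <;> try omega
    apply String.toList_inj.mp
    simp [pvAll, show pvSep 6 1 = "-" from by decide, show pvSep 6 2 = "-" from by decide,
      show pvSep 6 3 = "|" from by decide, show pvSep 6 4 = "-" from by decide,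
      show pvSep 6 5 = "-" from by decide,
      PySem.List.slice_to, PySem.List.slice_from,
      PySem.Str.toList_join, PySem.Chars.join_cons_cons, PySem.Chars.join_singleton,
      String.toList_append]
  · have hlen : xs.length = 7 := by exact_mod_cast c7
    rcases xs with _ | ⟨a, _ | ⟨b, _ | ⟨c, _ | ⟨d, _ | ⟨e, _ | ⟨f, _ | ⟨g, _ | ⟨h, t⟩⟩⟩⟩⟩⟩⟩⟩ <;>
      simp at hlen <;> try omega
    apply String.toList_inj.mp
    simp [pvAll, show pvSep 7 1 = "-" from by decide, show pvSep 7 2 = "-" from by decide,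
      show pvSep 7 3 = "-" from by decide, show pvSep 7 4 = "|" from by decide,
      show pvSep 7 5 = "-" from by decide, show pvSep 7 6 = "-" from by decide,
      PySem.List.slice_to, PySem.List.slice_from,
      PySem.Str.toList_join, PySem.Chars.join_cons_cons, PySem.Chars.join_singleton,
      String.toList_append]
  · have hlen : xs.length = 8 := by exact_mod_cast c8
    rcases xs with _ | ⟨a, _ | ⟨b, _ | ⟨c, _ | ⟨d, _ | ⟨e, _ | ⟨f, _ | ⟨g, _ | ⟨h, _ | ⟨i, t⟩⟩⟩⟩⟩⟩⟩⟩⟩ <;>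
      simp at hlen <;> try omega
    apply String.toList_inj.mp
    simp [pvAll, show pvSep 8 1 = "-" from by decide, show pvSep 8 2 = "-" from by decide,
      show pvSep 8 3 = "-" from by decide, show pvSep 8 4 = "|" from by decide,
      show pvSep 8 5 = "-" from by decide, show pvSep 8 6 = "-" from by decide,
      show pvSep 8 7 = "-" from by decide,
      PySem.List.slice_to, PySem.List.slice_from,
      PySem.Str.toList_join, PySem.Chars.join_cons_cons, PySem.Chars.join_singleton,
      String.toList_append]
  · have hlen : xs.length = 9 := by exact_mod_cast c9
    rcases xs with _ | ⟨a, _ | ⟨b, _ | ⟨c, _ | ⟨d, _ | ⟨e, _ | ⟨f, _ | ⟨g, _ | ⟨h, _ | ⟨i, _ | ⟨j, t⟩⟩⟩⟩⟩⟩⟩⟩⟩⟩ <;>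
      simp at hlen <;> try omega
    apply String.toList_inj.mp
    simp [pvAll, show pvSep 9 1 = "-" from by decide, show pvSep 9 2 = "-" from by decide,
      show pvSep 9 3 = "|" from by decide, show pvSep 9 4 = "-" from by decide,
      show pvSep 9 5 = "-" from by decide, show pvSep 9 6 = "|" from by decide,
      show pvSep 9 7 = "-" from by decide, show pvSep 9 8 = "-" from by decide,
      PySem.List.slice_to, PySem.List.slice_from, PySem.List.slice_toNat,
      PySem.Str.toList_join, PySem.Chars.join_cons_cons, PySem.Chars.join_singleton,
      String.toList_append]
  · have hlen : xs.length = 10 := by exact_mod_cast c10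
    rcases xs with _ | ⟨a, _ | ⟨b, _ | ⟨c, _ | ⟨d, _ | ⟨e, _ | ⟨f, _ | ⟨g, _ | ⟨h, _ | ⟨i, _ | ⟨j, _ | ⟨k, t⟩⟩⟩⟩⟩⟩⟩⟩⟩⟩⟩ <;>
      simp at hlen <;> try omega
    apply String.toList_inj.mp
    simp [pvAll, show pvSep 10 1 = "-" from by decide, show pvSep 10 2 = "-" from by decide,
      show pvSep 10 3 = "|" from by decide, show pvSep 10 4 = "-" from by decide,
      show pvSep 10 5 = "-" from by decide, show pvSep 10 6 = "|" from by decide,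
      show pvSep 10 7 = "-" from by decide, show pvSep 10 8 = "-" from by decide,
      show pvSep 10 9 = "-" from by decide,
      PySem.List.slice_to, PySem.List.slice_from, PySem.List.slice_toNat,
      PySem.Str.toList_join, PySem.Chars.join_cons_cons, PySem.Chars.join_singleton,
      String.toList_append]
  · have hlen : xs.length = 12 := by exact_mod_cast c12
    rcases xs with _ | ⟨a, _ | ⟨b, _ | ⟨c, _ | ⟨d, _ | ⟨e, _ | ⟨f, _ | ⟨g, _ | ⟨h, _ | ⟨i, _ | ⟨j, _ | ⟨k, _ | ⟨l, _ | ⟨m, t⟩⟩⟩⟩⟩⟩⟩⟩⟩⟩⟩⟩⟩ <;>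
      simp at hlen <;> try omega
    apply String.toList_inj.mp
    simp [pvAll, show pvSep 12 1 = "-" from by decide, show pvSep 12 2 = "-" from by decide,
      show pvSep 12 3 = "|" from by decide, show pvSep 12 4 = "-" from by decide,
      show pvSep 12 5 = "-" from by decide, show pvSep 12 6 = "|" from by decide,
      show pvSep 12 7 = "-" from by decide, show pvSep 12 8 = "-" from by decide,
      show pvSep 12 9 = "|" from by decide, show pvSep 12 10 = "-" from by decide,
      show pvSep 12 11 = "-" from by decide,
      PySem.List.slice_to, PySem.List.slice_from, PySem.List.slice_toNat,
      PySem.Str.toList_join, PySem.Chars.join_cons_cons, PySem.Chars.join_singleton,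
      String.toList_append]
  · rw [show pvSep (xs.length : Int) = pvSep 0 from pvSep_default _ c7 c8 c10,
      default_eq xs.length xs rfl, PySem.List.foldl_append_singleton_eq_map, List.nil_append]
    rfl
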